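-- pv_equiv track=rewrite | github.com/khoajedi/codesignal | arcade/intro/longestWord.py | solution
-- ===== SOURCE A (Python) =====
-- def solution(text):
--     a = []
--     s = ""
--
--     for c in text:
--         if c.isalpha():
--             s += c
--         else:
--             a.append(s)
--             s = ""
--
--     a.append(s)
--     s = ""
--
--     m = max(len(e) for e in a)
--
--     for e in a:
--         if len(e) == m:
--             return e
-- ===== SOURCE B (Python) =====
-- def solution(text):
--     best = ""
--     cur = ""
--     for c in text:
--         if c.isalpha():
--             cur += c
--         else:
--             if len(cur) > len(best):
--                 best = cur
--             cur = ""
--     if len(cur) > len(best):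
--         best = cur
--     return best
-- ===== Notes on version B (the rewrite author's own statement) =====
-- stated objective: simpler
-- what changed: B replaces A's three passes (collect all runs into a list, compute the max length, rescan for the first run of that length) by a single pass keeping only the current run and the best-so-far run, updated with a strict comparison so the first of equal-length runs is kept.
import Mathlib
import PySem

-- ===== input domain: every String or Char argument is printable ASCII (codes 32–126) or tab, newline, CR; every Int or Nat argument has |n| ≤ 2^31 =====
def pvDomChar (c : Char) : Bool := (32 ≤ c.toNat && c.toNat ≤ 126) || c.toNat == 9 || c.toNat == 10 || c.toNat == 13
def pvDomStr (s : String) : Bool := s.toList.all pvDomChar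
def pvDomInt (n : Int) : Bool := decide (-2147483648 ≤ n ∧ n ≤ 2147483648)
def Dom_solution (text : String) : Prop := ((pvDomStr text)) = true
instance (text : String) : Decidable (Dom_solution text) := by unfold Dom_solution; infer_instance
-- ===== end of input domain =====

-- B replaces A's three passes (collect runs, take max length, rescan for first of that
-- length) by a single pass keeping only the current run and the best run so far.


-- ===== PORT A =====
-- the for-loop of A: runs collected in a, current run s
def pvLoopA : List Char → List (List Char) → List Char → (List (List Char) × List Char)
  | [], a, s => (a, s)
  | c :: cs, a, s =>
      if PySem.Chars.isalpha c then pvLoopA cs a (s ++ [c])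
      else pvLoopA cs (a ++ [s]) []

-- m = max(len(e) for e in a); then the first e with len(e) == m.
-- a is always nonempty and some element attains m, so the two fallbacks ([] / getD 0)
-- are unreachable (Python's max never sees an empty sequence and the final return fires).
def pvFinishA (a : List (List Char)) : List Char :=
  match a.find? (fun e =>
      (e.length : Int) == (PySem.List.max? (a.map (fun e => (e.length : Int))) (fun x => x)).getD 0) with
  | some e => e
  | none => []

def solution (text : String) : String :=
  String.ofList (pvFinishA ((pvLoopA text.toList [] []).1 ++ [(pvLoopA text.toList [] []).2]))

-- ===== PORT B =====
-- single pass: cur = current alphabetic run, best = longest run seen so far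
def pvLoopB : List Char → List Char → List Char → List Char
  | [], cur, best => if cur.length > best.length then cur else best
  | c :: cs, cur, best =>
      if PySem.Chars.isalpha c then pvLoopB cs (cur ++ [c]) best
      else pvLoopB cs [] (if cur.length > best.length then cur else best)

def solution_alt (text : String) : String := String.ofList (pvLoopB text.toList [] [])

-- ===== PRECONDITION & SPEC =====
def Spec_solution (text : String) (out : String) : Prop := out = solution_alt text
instance (text : String) (out : String) : Decidable (Spec_solution text out) := by unfold Spec_solution; infer_instance

-- ===== CLAIM (what is proved, stated in full; the proofs are below) =====
def Claim_equal_solution : Prop := ∀ (text : String), Dom_solution text → Spec_solution text (solution text)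

-- ===== LEMMAS AND PROOFS =====

-- keep the longer run, first wins ties (B's update step)
def pvPick (b e : List Char) : List Char := if e.length > b.length then e else b

-- running maximum of the lengths
def pvMaxlen (l : List (List Char)) : Nat := l.foldl (fun m e => max m e.length) 0

theorem pvFold_init (l : List (List Char)) (n : Nat) :
    l.foldl (fun m e => max m e.length) n = max n (l.foldl (fun m e => max m e.length) 0) := by
  induction l generalizing n with
  | nil => simp
  | cons e l ih =>
      simp only [List.foldl_cons]
      rw [ih (max n e.length), ih (max 0 e.length)]
      omega

theorem pvMaxlen_cons (e : List Char) (l : List (List Char)) :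
    pvMaxlen (e :: l) = max e.length (pvMaxlen l) := by
  simp only [pvMaxlen, List.foldl_cons]
  rw [pvFold_init]
  omega

theorem pvLe_maxlen (l : List (List Char)) : ∀ x ∈ l, x.length ≤ pvMaxlen l := by
  induction l with
  | nil => simp
  | cons e l ih =>
      intro x hx
      rw [pvMaxlen_cons, List.mem_cons] at *
      rcases hx with h | h
      · rw [h]; omega
      · exact le_trans (ih x h) (by omega)

-- the port's m equals the running maximum of the lengths, for a nonempty list
theorem pvM_eq (x : List Char) (t : List (List Char)) :
    (PySem.List.max? ((x :: t).map (fun e => (e.length : Int))) (fun y => y)).getD 0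
      = (pvMaxlen (x :: t) : Int) := by
  have hfold : ∀ (t : List (List Char)) (n : Nat),
      (t.map (fun e => (e.length : Int))).foldl max (n : Int)
        = ((t.foldl (fun m e => max m e.length) n : Nat) : Int) := by
    intro t
    induction t with
    | nil => intro n; simp
    | cons e t ih =>
        intro n
        simp only [List.map_cons, List.foldl_cons]
        rw [show max (n : Int) ((e.length : Nat) : Int) = ((max n e.length : Nat) : Int) by
              push_cast; rfl]
        exact ih (max n e.length)
  simp only [List.map_cons, PySem.List.max?_id_cons, Option.getD_some]
  rw [hfold t x.length]
  congr 1

-- a fold whose accumulator already dominates every element is constant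
theorem pvFold_const (l : List (List Char)) (b : List Char)
    (h : ∀ x ∈ l, x.length ≤ b.length) : l.foldl pvPick b = b := by
  induction l generalizing b with
  | nil => rfl
  | cons e l ih =>
      have he : e.length ≤ b.length := h e (by simp)
      simp only [List.foldl_cons, pvPick, if_neg (by omega : ¬ e.length > b.length)]
      exact ih b (fun x hx => h x (List.mem_cons_of_mem _ hx))

-- when the max strictly beats the accumulator, find? returns exactly the fold result
theorem pvFind_eq_fold (l : List (List Char)) (b : List Char) (M : Nat)
    (hb : b.length < M) (hM : M = max b.length (pvMaxlen l)) :
    l.find? (fun e => (e.length : Int) == (M : Int)) = some (l.foldl pvPick b) := by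
  induction l generalizing b with
  | nil => simp [pvMaxlen] at hM; omega
  | cons e l ih =>
      have hMl : pvMaxlen l ≤ M := by rw [hM, pvMaxlen_cons]; omega
      by_cases he : e.length = M
      · have hp : ((e.length : Int) == (M : Int)) = true := by
          simp [he]
        simp only [List.find?_cons, hp]
        have hpick : pvPick b e = e := by
          unfold pvPick; rw [if_pos]; omega
        simp only [List.foldl_cons, hpick]
        rw [pvFold_const l e (fun x hx => by
          have := pvLe_maxlen l x hx; omega)]
      · have hp : ((e.length : Int) == (M : Int)) = false := by
          simp [he]
        simp only [List.find?_cons, hp]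
        have heM : e.length < M := by
          have : e.length ≤ M := by rw [hM, pvMaxlen_cons]; omega
          omega
        have hpick : pvPick b e = if e.length > b.length then e else b := rfl
        simp only [List.foldl_cons]
        apply ih (pvPick b e)
        · unfold pvPick; split <;> omega
        · rw [pvMaxlen_cons] at hM
          unfold pvPick; split <;> omega

-- A's finish phase on a nonempty list IS the pvPick fold
theorem pvFinishA_eq_fold (x : List Char) (t : List (List Char)) :
    pvFinishA (x :: t) = (x :: t).foldl pvPick [] := by
  unfold pvFinishA
  rw [pvM_eq]

  by_cases h0 : pvMaxlen (x :: t) = 0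
  · -- every run is empty; find? returns the head [] and the fold stays []
    have hx : x.length = 0 := by
      have := pvLe_maxlen (x :: t) x (by simp); omega
    have hxe : x = [] := List.eq_nil_of_length_eq_zero hx
    have hfold : (x :: t).foldl pvPick [] = [] := by
      apply pvFold_const
      intro y hy
      have := pvLe_maxlen (x :: t) y hy; omega
    rw [hfold]
    simp only [List.find?_cons, show ((x.length : Int) == ((pvMaxlen (x :: t) : Nat) : Int)) = true by simp [hx, h0]]
    exact hxe
  · rw [pvFind_eq_fold (x :: t) [] (pvMaxlen (x :: t)) (by simpa using Nat.pos_of_ne_zero h0) rfl]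

-- the combined induction: A's loop + finish equals B's loop, for any residual state
theorem pvMain (cs : List Char) : ∀ (a : List (List Char)) (s : List Char),
    pvFinishA ((pvLoopA cs a s).1 ++ [(pvLoopA cs a s).2]) = pvLoopB cs s (a.foldl pvPick []) := by
  induction cs with
  | nil =>
      intro a s
      simp only [pvLoopA, pvLoopB]
      have h1 : a ++ [s] ≠ [] := by simp
      obtain ⟨x, t, hxt⟩ := List.exists_cons_of_ne_nil h1
      rw [hxt, pvFinishA_eq_fold, ← hxt, List.foldl_append]
      rfl
  | cons c cs ih =>
      intro a s
      simp only [pvLoopA, pvLoopB]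
      cases hc : PySem.Chars.isalpha c
      · simp only [Bool.false_eq_true, if_false]
        rw [ih (a ++ [s]) []]
        congr 1
        rw [List.foldl_append]
        rfl
      · simp only [if_true]; exact ih a (s ++ [c])

-- ===== VERDICT (by name: the statement is the Claim_ definition above) =====
theorem solution_spec : Claim_equal_solution := by
  intro text _
  unfold Spec_solution solution solution_alt
  have := pvMain text.toList [] []
  simp only [List.foldl_nil] at this
  rw [this]
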